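-- pv_equiv track=rewrite | github.com/zazabap/problem-reductions | docs/paper/verify-reductions/verify_hamiltonian_path_between_two_vertices_longest_path.py | extract_vertex_path
-- ===== SOURCE A (Python) =====
-- def extract_vertex_path(n, edges, edge_config, s):
--     """Extract vertex-order path from edge selection, starting at s."""
--     m = len(edges)
--     adj = {}
--     for idx in range(m):
--         if edge_config[idx] == 1:
--             u, v = edges[idx]
--             adj.setdefault(u, []).append(v)
--             adj.setdefault(v, []).append(u)
--
--     path = [s]
--     visited = {s}
--     current = s
--     while True:
--         neighbors = [v for v in adj.get(current, []) if v not in visited]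
--         if not neighbors:
--             break
--         nxt = neighbors[0]
--         path.append(nxt)
--         visited.add(nxt)
--         current = nxt
--     return path
-- ===== SOURCE B (Python) =====
-- def extract_vertex_path(n, edges, edge_config, s):
--     """Extract vertex-order path from edge selection, starting at s.
--
--     Alternative decomposition: no adjacency dict is built; each step scans the
--     selected edges in original order for the first edge incident to the current
--     vertex whose other endpoint is unvisited (this matches the adjacency-list
--     order, which was built in edge order).
--     """
--     path = [s]
--     visited = {s}
--     current = s
--     while True:
--         nxt = None
--         for (u, v), c in zip(edges, edge_config):
--             if c != 1:
--                 continue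
--             if u == current and v not in visited:
--                 nxt = v
--                 break
--             if v == current and u not in visited:
--                 nxt = u
--                 break
--         if nxt is None:
--             break
--         path.append(nxt)
--         visited.add(nxt)
--         current = nxt
--     return path
-- ===== Notes on version B (the rewrite author's own statement) =====
-- stated objective: alternative
-- what changed: B drops A's prebuilt adjacency dictionary entirely and instead, at each step of the walk, scans the edge list in original order for the first selected edge incident to the current vertex with an unvisited other endpoint, which reproduces A's adjacency-order pick because A builds adjacency in edge order.
import Mathlib
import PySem

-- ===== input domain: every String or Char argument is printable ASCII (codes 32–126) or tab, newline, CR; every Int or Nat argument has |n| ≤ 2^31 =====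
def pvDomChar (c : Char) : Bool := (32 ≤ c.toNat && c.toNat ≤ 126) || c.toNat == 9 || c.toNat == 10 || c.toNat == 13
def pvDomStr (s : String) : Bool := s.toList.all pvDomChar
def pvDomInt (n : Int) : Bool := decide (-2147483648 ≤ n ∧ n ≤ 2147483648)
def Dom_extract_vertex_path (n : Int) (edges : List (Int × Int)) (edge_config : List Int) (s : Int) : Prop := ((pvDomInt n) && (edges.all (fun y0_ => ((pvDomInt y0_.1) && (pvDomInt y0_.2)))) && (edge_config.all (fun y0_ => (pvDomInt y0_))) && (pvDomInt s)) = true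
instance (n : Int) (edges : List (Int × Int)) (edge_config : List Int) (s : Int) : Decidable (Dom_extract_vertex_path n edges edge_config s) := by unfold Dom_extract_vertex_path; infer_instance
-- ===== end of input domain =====

-- B replaces A's prebuilt adjacency dictionary by a per-step scan of the edge list (same result; alternative decomposition, not claimed faster).


-- ===== PORT A =====
-- the while-loop: pick the first unvisited entry of adj[current]; fuel 2*m+1 is an upper
-- bound on the iterations the Python loop can make (each step visits a new edge endpoint)
def pvWalkA (adj : PySem.Dict Int (List Int)) : Nat → List Int → PySem.Set Int → Int → List Int
  | 0, path, _, _ => path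
  | fuel+1, path, visited, current =>
    match (adj.getD current []).filter (fun v => !(PySem.Set.contains visited v)) with
    | [] => path
    | nxt :: _ => pvWalkA adj fuel (path ++ [nxt]) (PySem.Set.add visited nxt) nxt

-- 'for idx in range(m): if edge_config[idx] == 1: u, v = edges[idx]; …' is ported as a fold over
-- zip edges edge_config — exact whenever edge_config has at least edges.length entries (Pre_);
-- adj.setdefault(k, []).append(x) is Dict.modify k [] (· ++ [x])
def extract_vertex_path (n : Int) (edges : List (Int × Int)) (edge_config : List Int) (s : Int) : List Int :=
  let adj := (List.zip edges edge_config).foldl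
    (fun d p =>
      if p.2 = 1 then
        (d.modify p.1.1 [] (· ++ [p.1.2])).modify p.1.2 [] (· ++ [p.1.1])
      else d) PySem.Dict.empty
  pvWalkA adj (2 * edges.length + 1) [s] (PySem.Set.add PySem.Set.empty s) s

-- ===== PORT B =====
-- the inner for-loop of B: first selected edge incident to current with an unvisited other end
def pvFindB (current : Int) (visited : PySem.Set Int) : List ((Int × Int) × Int) → Option Int
  | [] => none
  | ((u, v), c) :: rest =>
    if c ≠ 1 then pvFindB current visited rest
    else if u = current ∧ !(PySem.Set.contains visited v) then some v
    else if v = current ∧ !(PySem.Set.contains visited u) then some u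
    else pvFindB current visited rest

def pvWalkB (L : List ((Int × Int) × Int)) : Nat → List Int → PySem.Set Int → Int → List Int
  | 0, path, _, _ => path
  | fuel+1, path, visited, current =>
    match pvFindB current visited L with
    | none => path
    | some nxt => pvWalkB L fuel (path ++ [nxt]) (PySem.Set.add visited nxt) nxt

def extract_vertex_path_alt (n : Int) (edges : List (Int × Int)) (edge_config : List Int) (s : Int) : List Int :=
  pvWalkB (List.zip edges edge_config) (2 * edges.length + 1) [s] (PySem.Set.add PySem.Set.empty s) s

-- ===== PRECONDITION & SPEC =====
-- Pre_: A indexes edge_config[idx] for every idx < len(edges) and raises IndexError when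
-- edge_config is shorter than edges; exactly those inputs are excluded.
def Pre_extract_vertex_path (n : Int) (edges : List (Int × Int)) (edge_config : List Int) (s : Int) : Prop :=
  edges.length ≤ edge_config.length
instance (n : Int) (edges : List (Int × Int)) (edge_config : List Int) (s : Int) : Decidable (Pre_extract_vertex_path n edges edge_config s) := by unfold Pre_extract_vertex_path; infer_instance

def pvWitness_extract_vertex_path : Int × (List (Int × Int)) × List Int × Int :=
  (3, [(0, 1), (1, 2)], [1, 1], 0)

def Spec_extract_vertex_path (n : Int) (edges : List (Int × Int)) (edge_config : List Int) (s : Int) (out : List Int) : Prop := out = extract_vertex_path_alt n edges edge_config s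
instance (n : Int) (edges : List (Int × Int)) (edge_config : List Int) (s : Int) (out : List Int) : Decidable (Spec_extract_vertex_path n edges edge_config s out) := by unfold Spec_extract_vertex_path; infer_instance

-- ===== CLAIM (what is proved, stated in full; the proofs are below) =====
def Claim_equal_extract_vertex_path : Prop := ∀ (n : Int) (edges : List (Int × Int)) (edge_config : List Int) (s : Int), Dom_extract_vertex_path n edges edge_config s → Pre_extract_vertex_path n edges edge_config s → Spec_extract_vertex_path n edges edge_config s (extract_vertex_path n edges edge_config s)

-- ===== LEMMAS AND PROOFS =====

-- the per-edge directed-pair expansion: a selected edge (u,v) contributes v to adj[u] then u to adj[v]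
def pvPairs (p : (Int × Int) × Int) : List (Int × Int) :=
  if p.2 = 1 then [(p.1.1, p.1.2), (p.1.2, p.1.1)] else []

lemma pvBuildAdj_eq_flat (L : List ((Int × Int) × Int)) (d : PySem.Dict Int (List Int)) :
    L.foldl (fun d p =>
        if p.2 = 1 then
          (d.modify p.1.1 [] (· ++ [p.1.2])).modify p.1.2 [] (· ++ [p.1.1])
        else d) d
      = (L.flatMap pvPairs).foldl (fun d q => d.modify q.1 [] (· ++ [q.2])) d := by
  induction L generalizing d with
  | nil => rfl
  | cons hd tl ih =>
    rcases hd with ⟨⟨u, v⟩, c⟩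
    simp only [List.foldl_cons, List.flatMap_cons, List.foldl_append, pvPairs]
    by_cases hc : c = 1 <;> simp [hc, ih]

lemma pvAdjGetD (L : List ((Int × Int) × Int)) (x : Int) :
    ((L.foldl (fun d p =>
        if p.2 = 1 then
          (d.modify p.1.1 [] (· ++ [p.1.2])).modify p.1.2 [] (· ++ [p.1.1])
        else d) PySem.Dict.empty).getD x [])
      = ((L.flatMap pvPairs).filter (fun q => q.1 == x)).map (·.2) := by
  rw [pvBuildAdj_eq_flat, PySem.Dict.getD_foldl_modify_append]
  simp

-- the first unvisited neighbour of x (in adjacency order) is what B's edge scan finds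
lemma pvFind_eq_head (L : List ((Int × Int) × Int)) (x : Int) (visited : PySem.Set Int) :
    ((((L.flatMap pvPairs).filter (fun q => q.1 == x)).map (·.2)).filter
        (fun v => !(PySem.Set.contains visited v))).head?
      = pvFindB x visited L := by
  induction L with
  | nil => rfl
  | cons hd tl ih =>
    rcases hd with ⟨⟨u, v⟩, c⟩
    by_cases hc : c = 1
    · simp only [List.flatMap_cons, List.filter_append, List.map_append, pvFindB, pvPairs,
        hc, if_neg (by simp : ¬ (1 : Int) ≠ 1)]
      by_cases hu : u = x <;> by_cases hv : v = x <;>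
        by_cases hmv : PySem.Set.contains visited v <;>
        by_cases hmu : PySem.Set.contains visited u <;>
        simp [hu, hv] <;>
        simp_all
    · have hp : pvPairs ((u, v), c) = [] := by simp [pvPairs, hc]
      rw [List.flatMap_cons, hp, List.nil_append, pvFindB, if_pos hc]
      exact ih

lemma pvWalk_eq (L : List ((Int × Int) × Int)) (fuel : Nat) (path : List Int)
    (visited : PySem.Set Int) (current : Int) :
    pvWalkA (L.foldl (fun d p =>
        if p.2 = 1 then
          (d.modify p.1.1 [] (· ++ [p.1.2])).modify p.1.2 [] (· ++ [p.1.1])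
        else d) PySem.Dict.empty) fuel path visited current
      = pvWalkB L fuel path visited current := by
  induction fuel generalizing path visited current with
  | zero => rfl
  | succ f ih =>
    rw [pvWalkA, pvWalkB]
    have h := pvFind_eq_head L current visited
    rw [pvAdjGetD] at *
    cases hB : pvFindB current visited L with
    | none =>
      rw [hB] at h
      rw [List.head?_eq_none_iff.mp h]
    | some nxt =>
      rw [hB] at h
      obtain ⟨tl, htl⟩ : ∃ tl, (((L.flatMap pvPairs).filter (fun q => q.1 == current)).map (·.2)).filter
          (fun v => !(PySem.Set.contains visited v)) = nxt :: tl := by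
        cases hlist : (((L.flatMap pvPairs).filter (fun q => q.1 == current)).map (·.2)).filter
            (fun v => !(PySem.Set.contains visited v)) with
        | nil => rw [hlist] at h; simp at h
        | cons a t => rw [hlist] at h; simp at h; exact ⟨t, by rw [h]⟩
      rw [htl]
      exact ih _ _ _

-- ===== VERDICT (by name: the statement is the Claim_ definition above) =====
theorem extract_vertex_path_spec : Claim_equal_extract_vertex_path := by
  intro n edges edge_config s _ _
  unfold Spec_extract_vertex_path extract_vertex_path extract_vertex_path_alt
  exact pvWalk_eq _ _ _ _ _
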